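-- pv_equiv track=rewrite | github.com/pratyushm2002/webpage | employee_server.py | extract_employee_data
-- ===== SOURCE A (Python) =====
-- def extract_employee_data(post_data):
--     emp_id = emp_name = emp_email = ""
--     post_data = post_data.split('&')
--     for item in post_data:
--         key, value = item.split('=')
--         if key == 'emp_id':
--             emp_id = value
--         elif key == 'emp_name':
--             emp_name = value
--         elif key == 'emp_email':
--             emp_email = value.replace("%40","@")
--     return [emp_id, emp_name, emp_email]
-- ===== SOURCE B (Python) =====
-- def extract_employee_data(post_data):
--     pairs = [(k, v) for k, v in (item.split('=') for item in post_data.split('&'))]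
--
--     def last_value(key):
--         for k, v in reversed(pairs):
--             if k == key:
--                 return v
--         return ''
--
--     return [last_value('emp_id'), last_value('emp_name'),
--             last_value('emp_email').replace('%40', '@')]
-- ===== Notes on version B (the rewrite author's own statement) =====
-- stated objective: alternative
-- what changed: Replaces A's single forward pass with a triple accumulator and if/elif dispatch by splitting all pairs once and answering each of the three fields with an independent backward (reversed) search for the last matching key.
import Mathlib
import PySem

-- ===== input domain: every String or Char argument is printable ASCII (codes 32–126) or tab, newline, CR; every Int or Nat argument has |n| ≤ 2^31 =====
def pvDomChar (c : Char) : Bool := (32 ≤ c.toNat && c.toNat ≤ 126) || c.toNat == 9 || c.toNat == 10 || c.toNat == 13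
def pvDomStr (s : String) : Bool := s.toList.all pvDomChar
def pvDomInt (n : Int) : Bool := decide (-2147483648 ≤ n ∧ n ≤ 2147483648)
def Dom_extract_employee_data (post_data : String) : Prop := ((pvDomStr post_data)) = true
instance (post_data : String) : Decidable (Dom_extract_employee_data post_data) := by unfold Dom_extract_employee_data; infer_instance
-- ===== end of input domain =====

-- B replaces A's single forward accumulating pass (triple accumulator, if/elif
-- dispatch) by splitting all pairs once and answering each of the three fields
-- with an independent BACKWARD search for the last matching key (objective:
-- alternative, same cost).

-- ===== PORT A =====
-- A's loop body (the if/elif dispatch); items that do not split into exactly two pieces raise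
-- ValueError in Python (outside Pre_) and are skipped here.
def pvStepA (acc : String × String × String) (item : String) : String × String × String :=
  match (PySem.Str.split? item "=").getD [] with
  | [key, value] =>
    if key == "emp_id" then (value, acc.2.1, acc.2.2)
    else if key == "emp_name" then (acc.1, value, acc.2.2)
    else if key == "emp_email" then (acc.1, acc.2.1, PySem.Str.replace value "%40" "@")
    else acc
  | _ => acc

def extract_employee_data (post_data : String) : List String :=
  let st := ((PySem.Str.split? post_data "&").getD []).foldl pvStepA ("", "", "")
  [st.1, st.2.1, st.2.2]

-- ===== PORT B =====
-- item.split('=') (the '&'-separator and '='-separator are nonempty, so split?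
-- is always `some`; .getD [] only totalizes).
def pvSplitEq (it : String) : List String := (PySem.Str.split? it "=").getD []

-- the `(k, v)` unpack of item.split('='); Python raises ValueError unless the
-- split has exactly 2 pieces — those inputs are outside Pre_, the default
-- branch is never reached on admitted inputs.
def pvPairB (it : String) : String × String :=
  match pvSplitEq it with
  | [k, v] => (k, v)
  | _ => ("", "")

-- B's `last_value`: scan the pairs back-to-front, return the value of the
-- first pair whose key matches.
def pvLastValue (pairs : List (String × String)) (key : String) : String :=
  match pairs.reverse.find? (fun p => p.1 == key) with
  | some p => p.2
  | none => ""

def extract_employee_data_alt (post_data : String) : List String :=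
  let pairs := ((PySem.Str.split? post_data "&").getD []).map pvPairB
  [pvLastValue pairs "emp_id", pvLastValue pairs "emp_name",
   PySem.Str.replace (pvLastValue pairs "emp_email") "%40" "@"]

-- ===== PRECONDITION & SPEC =====
-- Pre_ excludes exactly the inputs containing an item that does not split into exactly two pieces at the equals sign
-- (split length ≠ 2), on which Python A raises ValueError at the unpack.
def Pre_extract_employee_data (post_data : String) : Prop :=
  ∀ item ∈ (PySem.Str.split? post_data "&").getD [],
    ((PySem.Str.split? item "=").getD []).length = 2
instance (post_data : String) : Decidable (Pre_extract_employee_data post_data) := by unfold Pre_extract_employee_data; infer_instance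
def pvWitness_extract_employee_data : String := "emp_id=1&emp_name=bob&emp_email=a%40b.com"

def Spec_extract_employee_data (post_data : String) (out : List String) : Prop := out = extract_employee_data_alt post_data
instance (post_data : String) (out : List String) : Decidable (Spec_extract_employee_data post_data out) := by unfold Spec_extract_employee_data; infer_instance

-- ===== CLAIM (what is proved, stated in full; the proofs are below) =====
def Claim_equal_extract_employee_data : Prop := ∀ (post_data : String), Dom_extract_employee_data post_data → Pre_extract_employee_data post_data → Spec_extract_employee_data post_data (extract_employee_data post_data)

-- ===== LEMMAS AND PROOFS =====

-- the value B's backward search is after, as an Option over A's item list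
def pvFindVal (items : List String) (key : String) : Option String :=
  (items.reverse.find? (fun it => (pvPairB it).1 == key)).map (fun it => (pvPairB it).2)

-- generic component lemma: any projection of A's fold that pvStepA updates to
-- `post value` exactly when the item's key is `key` equals the backward search
theorem pvFold_comp (key : String) (proj : String × String × String → String)
    (post : String → String)
    (hproj : ∀ acc it, (pvSplitEq it).length = 2 →
      proj (pvStepA acc it) =
        if (pvPairB it).1 == key then post (pvPairB it).2 else proj acc) :
    ∀ (items : List String) (acc : String × String × String),
      (∀ it ∈ items, (pvSplitEq it).length = 2) →
      proj (items.foldl pvStepA acc) = ((pvFindVal items key).map post).getD (proj acc) := by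
  intro items
  induction items with
  | nil => intro acc _; simp [pvFindVal]
  | cons it rest ih =>
    intro acc h
    have hlen := h it (List.mem_cons_self)
    simp only [List.foldl_cons]
    rw [ih _ (fun x hx => h x (List.mem_cons_of_mem _ hx)), hproj acc it hlen]
    unfold pvFindVal
    rw [List.reverse_cons, List.find?_append]
    cases hf : rest.reverse.find? (fun it => (pvPairB it).1 == key) with
    | some x => simp
    | none =>
      by_cases hp : ((pvPairB it).1 == key) = true
      · simp [List.find?, hp]
      · simp [List.find?, hp]

-- bridge B's search over mapped pairs to pvFindVal
theorem pvLastValue_eq (items : List String) (key : String) :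
    pvLastValue (items.map pvPairB) key = (pvFindVal items key).getD "" := by
  unfold pvLastValue pvFindVal
  rw [← List.map_reverse, List.find?_map]
  simp only [Function.comp_def]
  cases hf : items.reverse.find? (fun it => (pvPairB it).1 == key) with
  | none => rfl
  | some x => rfl

theorem pvStep_fst (acc : String × String × String) (it : String)
    (h : (pvSplitEq it).length = 2) :
    (pvStepA acc it).1 =
      if (pvPairB it).1 == "emp_id"
      then id ((pvPairB it).2) else acc.1 := by
  obtain ⟨k, v, hkv⟩ := List.length_eq_two.mp h
  simp only [pvStepA, pvPairB, pvSplitEq] at *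
  rw [hkv]
  by_cases h1 : k = "emp_id" <;> by_cases h2 : k = "emp_name" <;>
    by_cases h3 : k = "emp_email" <;>
    simp_all

theorem pvStep_name (acc : String × String × String) (it : String)
    (h : (pvSplitEq it).length = 2) :
    (pvStepA acc it).2.1 =
      if (pvPairB it).1 == "emp_name"
      then id ((pvPairB it).2) else acc.2.1 := by
  obtain ⟨k, v, hkv⟩ := List.length_eq_two.mp h
  simp only [pvStepA, pvPairB, pvSplitEq] at *
  rw [hkv]
  by_cases h1 : k = "emp_id" <;> by_cases h2 : k = "emp_name" <;>
    by_cases h3 : k = "emp_email" <;>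
    simp_all

theorem pvStep_email (acc : String × String × String) (it : String)
    (h : (pvSplitEq it).length = 2) :
    (pvStepA acc it).2.2 =
      if (pvPairB it).1 == "emp_email"
      then PySem.Str.replace ((pvPairB it).2) "%40" "@"
      else acc.2.2 := by
  obtain ⟨k, v, hkv⟩ := List.length_eq_two.mp h
  simp only [pvStepA, pvPairB, pvSplitEq] at *
  rw [hkv]
  by_cases h1 : k = "emp_id" <;> by_cases h2 : k = "emp_name" <;>
    by_cases h3 : k = "emp_email" <;>
    simp_all

-- ===== VERDICT (by name: the statement is the Claim_ definition above) =====
theorem extract_employee_data_spec : Claim_equal_extract_employee_data := by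
  intro post_data _ hpre
  unfold Spec_extract_employee_data extract_employee_data extract_employee_data_alt
  have hpre' : ∀ it ∈ (PySem.Str.split? post_data "&").getD [],
      (pvSplitEq it).length = 2 := hpre
  set items := (PySem.Str.split? post_data "&").getD [] with hitems
  have h1 := pvFold_comp "emp_id" (fun a => a.1) id pvStep_fst items ("", "", "") hpre'
  have h2 := pvFold_comp "emp_name" (fun a => a.2.1) id pvStep_name items ("", "", "") hpre'
  have h3 := pvFold_comp "emp_email" (fun a => a.2.2)
      (fun v => PySem.Str.replace v "%40" "@") pvStep_email items ("", "", "") hpre'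
  simp only [h1, h2, h3, pvLastValue_eq]
  refine List.cons_eq_cons.mpr ⟨?_, List.cons_eq_cons.mpr ⟨?_, List.cons_eq_cons.mpr ⟨?_, rfl⟩⟩⟩
  · cases pvFindVal items "emp_id" <;> simp
  · cases pvFindVal items "emp_name" <;> simp
  · cases pvFindVal items "emp_email" <;> simp
    decide
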